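-- pv_equiv track=rewrite | github.com/RoRdil31/Programmers | Python3/프로그래머스/2/42586. 기능개발/기능개발.py | solution
-- ===== SOURCE A (Python) =====
-- import math
--
-- def solution(progresses, speeds):
--     answer = []
--     prog = [math.ceil((100-i)/j) for i,j in zip(progresses, speeds)]
--     maxnum, cnt = prog[0], 0
--     for i in prog:
--         if maxnum < i :
--             maxnum = i
--             answer.append(cnt)
--             cnt = 1
--             continue
--         cnt += 1
--     answer.append(cnt)
--     return answer
-- ===== SOURCE B (Python) =====
-- import math
--
-- def solution(progresses, speeds):
--     prog = [math.ceil((100 - p) / s) for p, s in zip(progresses, speeds)]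
--     # stage 1: deployment day of each task = running maximum of prog
--     deploy = []
--     m = None
--     for d in prog:
--         m = d if m is None or d > m else m
--         deploy.append(m)
--     # stage 2: histogram dict keyed by deployment day; insertion order is
--     # deployment order because deploy is non-decreasing
--     hist = {}
--     for d in deploy:
--         hist[d] = hist.get(d, 0) + 1
--     return list(hist.values())
-- ===== Notes on version B (the rewrite author's own statement) =====
-- stated objective: alternative
-- what changed: A runs one fused loop with a group counter that resets at each new running maximum; B instead stages the work into two passes and a different data structure: it first materializes each task's deployment day (the running maximum list), then builds an insertion-ordered histogram dict keyed by deployment day and returns the dict's values.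
import Mathlib
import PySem

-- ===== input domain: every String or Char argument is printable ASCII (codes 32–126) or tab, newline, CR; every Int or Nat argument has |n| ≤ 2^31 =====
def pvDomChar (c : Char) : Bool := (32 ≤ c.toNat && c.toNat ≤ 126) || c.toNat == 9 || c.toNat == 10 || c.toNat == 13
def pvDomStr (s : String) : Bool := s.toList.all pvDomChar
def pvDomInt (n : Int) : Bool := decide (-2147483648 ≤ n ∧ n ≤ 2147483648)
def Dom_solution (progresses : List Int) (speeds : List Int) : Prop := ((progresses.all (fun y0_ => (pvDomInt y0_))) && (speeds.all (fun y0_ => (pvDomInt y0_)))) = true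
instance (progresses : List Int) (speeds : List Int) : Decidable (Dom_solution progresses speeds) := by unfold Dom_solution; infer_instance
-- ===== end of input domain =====

-- B replaces A's fused counter loop by two staged passes — materialize each task's
-- deployment day (running maximum), then a histogram dict whose values are the answer
-- (alternative decomposition/data structure, same O(n) cost).


-- math.ceil((100-i)/j) ported as exact ceiling division -((-(100-i)) // j).
-- Exact on Dom (j ≠ 0): |100-i| ≤ 2^31+100 < 2^52, so the correctly-rounded float
-- quotient can never cross an integer away from the exact quotient.
def pvCeil (i j : Int) : Int := -(PySem.Int.floordiv (-(100 - i)) j)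

-- ===== PORT A =====
def solution (progresses : List Int) (speeds : List Int) : List Int :=
  let prog := (progresses.zip speeds).map (fun pj => pvCeil pj.1 pj.2)
  match prog with
  | [] => []   -- Python raises IndexError on prog[0] here; excluded by Pre_solution
  | p0 :: _ =>
    let st := prog.foldl
      (fun (acc : List Int × Int × Int) i =>
        if acc.2.1 < i then (acc.1 ++ [acc.2.2], i, 1)
        else (acc.1, acc.2.1, acc.2.2 + 1))
      ([], p0, 0)
    st.1 ++ [st.2.2]

-- ===== PORT B =====
def solution_alt (progresses : List Int) (speeds : List Int) : List Int :=
  let prog := (progresses.zip speeds).map (fun pj => pvCeil pj.1 pj.2)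
  -- stage 1: deployment day of each task = running maximum (m starts as None)
  let st := prog.foldl
    (fun (acc : Option Int × List Int) d =>
      let m : Int := match acc.1 with
        | none => d
        | some mm => if d > mm then d else mm
      (some m, acc.2 ++ [m]))
    (none, [])
  -- stage 2: histogram dict keyed by deployment day; return its values
  let hist := st.2.foldl
    (fun (h : PySem.Dict Int Int) x => h.insert x (h.getD x 0 + 1))
    PySem.Dict.empty
  hist.values

-- ===== PRECONDITION & SPEC =====
-- Pre_ excludes exactly the inputs where A raises: an empty zip (IndexError on prog[0])
-- and a zipped speed of 0 (ZeroDivisionError).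
def Pre_solution (progresses : List Int) (speeds : List Int) : Prop :=
  progresses.zip speeds ≠ [] ∧ ∀ pj ∈ progresses.zip speeds, pj.2 ≠ 0
instance (progresses : List Int) (speeds : List Int) : Decidable (Pre_solution progresses speeds) := by unfold Pre_solution; infer_instance
def pvWitness_solution : List Int × List Int := ([93, 30, 55], [1, 30, 5])
def Spec_solution (progresses : List Int) (speeds : List Int) (out : List Int) : Prop := out = solution_alt progresses speeds
instance (progresses : List Int) (speeds : List Int) (out : List Int) : Decidable (Spec_solution progresses speeds out) := by unfold Spec_solution; infer_instance

-- ===== CLAIM (what is proved, stated in full; the proofs are below) =====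
def Claim_equal_solution : Prop := ∀ (progresses : List Int) (speeds : List Int), Dom_solution progresses speeds → Pre_solution progresses speeds → Spec_solution progresses speeds (solution progresses speeds)

-- ===== LEMMAS AND PROOFS =====

-- reference recursion for A: remaining group sizes given current max m and current count c
def runA (m c : Int) : List Int → List Int
  | [] => [c]
  | i :: t => if m < i then c :: runA i 1 t else runA m (c + 1) t

-- reference recursion for B's stage 1: prefix maxima of the tail, current max m
def mapPM (m : Int) : List Int → List Int
  | [] => []
  | d :: t => if d > m then d :: mapPM d t else m :: mapPM m t

theorem foldA (l : List Int) (ans : List Int) (m c : Int) :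
    (l.foldl
      (fun (acc : List Int × Int × Int) i =>
        if acc.2.1 < i then (acc.1 ++ [acc.2.2], i, 1)
        else (acc.1, acc.2.1, acc.2.2 + 1))
      (ans, m, c)).1 ++ [(l.foldl
      (fun (acc : List Int × Int × Int) i =>
        if acc.2.1 < i then (acc.1 ++ [acc.2.2], i, 1)
        else (acc.1, acc.2.1, acc.2.2 + 1))
      (ans, m, c)).2.2] = ans ++ runA m c l := by
  induction l generalizing ans m c with
  | nil => simp [runA]
  | cons i t ih =>
    by_cases h : m < i
    · simp [List.foldl_cons, runA, h, ih]
    · simp [List.foldl_cons, runA, h, ih]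

-- B's stage-1 fold over the tail computes mapPM
theorem foldPM (t : List Int) (m : Int) (acc : List Int) :
    (t.foldl
      (fun (acc : Option Int × List Int) d =>
        let mm : Int := match acc.1 with
          | none => d
          | some mm => if d > mm then d else mm
        (some mm, acc.2 ++ [mm]))
      (some m, acc)).2 = acc ++ mapPM m t := by
  induction t generalizing m acc with
  | nil => simp [mapPM]
  | cons x t ih =>
    by_cases h : x > m
    · simp only [List.foldl_cons, mapPM, if_pos h, ih]
      simp
    · simp only [List.foldl_cons, mapPM, if_neg h, ih]
      simp

-- B's stage-2 counter fold: if the dict so far is pre ++ [(m, c)] with all earlier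
-- keys below m, folding the histogram step over mapPM m t yields pre-values ++ runA m c t
theorem foldHist (t : List Int) (m c : Int) (pre : List (Int × Int)) (d : PySem.Dict Int Int)
    (hitems : d.items = pre ++ [(m, c)])
    (hlt : ∀ k ∈ pre.map Prod.fst, k < m)
    (hnd : (pre.map Prod.fst).Nodup) :
    ((mapPM m t).foldl (fun (h : PySem.Dict Int Int) x => h.insert x (h.getD x 0 + 1)) d).values
      = pre.map Prod.snd ++ runA m c t := by
  induction t generalizing m c pre d with
  | nil =>
    simp [mapPM, runA, PySem.Dict.values, hitems]
  | cons x t ih =>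
    have hkeys : d.keys = pre.map Prod.fst ++ [m] := by
      simp [PySem.Dict.keys, hitems]
    have hndk : d.keys.Nodup := by
      rw [hkeys]
      refine List.Nodup.append hnd (List.nodup_singleton m) ?_
      intro a ha hb
      have := hlt a ha
      simp at hb
      omega
    by_cases h : x > m
    · -- new maximum: fresh key x appended with count 1
      have hnc : d.contains x = false := by
        rw [PySem.Dict.contains_eq_decide_mem_keys, hkeys]
        simp only [decide_eq_false_iff_not, List.mem_append, List.mem_singleton]
        rintro (hx | hx)
        · have := hlt x hx; omega
        · omega
      have hgd : d.getD x 0 = 0 := PySem.Dict.getD_of_not_contains d 0 hnc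
      have hit : (d.insert x (d.getD x 0 + 1)).items = (pre ++ [(m, c)]) ++ [(x, 1)] := by
        rw [PySem.Dict.items_insert_of_not_contains (h := hnc), hitems, hgd]
        norm_num
      have hlt' : ∀ k ∈ (pre ++ [(m, c)]).map Prod.fst, k < x := by
        intro k hk
        simp only [List.map_append, List.map_cons, List.map_nil, List.mem_append,
          List.mem_singleton] at hk
        rcases hk with hk | hk
        · exact lt_trans (hlt k hk) h
        · omega
      have hnd' : ((pre ++ [(m, c)]).map Prod.fst).Nodup := by
        simp only [List.map_append, List.map_cons, List.map_nil]
        refine List.Nodup.append hnd (List.nodup_singleton m) ?_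
        intro a ha hb
        have := hlt a ha
        simp at hb
        omega
      rw [mapPM, if_pos h, List.foldl_cons]
      rw [ih x 1 (pre ++ [(m, c)]) _ hit hlt' hnd']
      rw [runA, if_pos h]
      simp
    · -- same group: overwrite key m in place with count c+1
      have hmem : (m, c) ∈ d.items := by rw [hitems]; simp
      have hgd : d.getD m 0 = c := PySem.Dict.getD_of_mem_items d hmem hndk 0
      have hct : d.contains m = true := by
        rw [PySem.Dict.contains_eq_decide_mem_keys, hkeys]; simp
      have hpre : pre.map (fun p => if (p.1 == m) = true then (m, d.getD m 0 + 1) else p)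
          = pre.map id := by
        apply List.map_congr_left
        intro p hp
        have hp1 : p.1 < m := hlt p.1 (List.mem_map_of_mem hp)
        have hbe : (p.1 == m) = false := by simp; omega
        simp [hbe]
      have hit : (d.insert m (d.getD m 0 + 1)).items = pre ++ [(m, c + 1)] := by
        rw [PySem.Dict.items_insert_of_contains d _ hct, hitems]
        rw [List.map_append, hpre, List.map_id, hgd]
        simp
      rw [mapPM, if_neg h, List.foldl_cons]
      rw [ih m (c + 1) pre _ hit hlt hnd]
      rw [runA, if_neg (by omega)]

-- ===== VERDICT (by name: the statement is the Claim_ definition above) =====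
theorem solution_spec : Claim_equal_solution := by
  intro p s _ hpre
  unfold Spec_solution solution solution_alt
  obtain ⟨hne, -⟩ := hpre
  cases hz : p.zip s with
  | nil => exact absurd hz hne
  | cons pj rest =>
    simp only [List.map_cons, List.foldl_cons]
    rw [foldA]
    set m0 := pvCeil pj.1 pj.2 with hm0
    rw [if_neg (lt_irrefl m0)]
    rw [foldPM]
    simp only [List.nil_append, List.singleton_append, List.foldl_cons]
    have h1 : (PySem.Dict.empty.insert m0 ((PySem.Dict.empty : PySem.Dict Int Int).getD m0 0 + 1)).items
        = [] ++ [(m0, 1)] := by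
      rw [PySem.Dict.items_insert_of_not_contains (h := PySem.Dict.contains_empty m0)]
      rw [PySem.Dict.getD_empty]
      simp [PySem.Dict.empty]
    rw [foldHist (rest.map (fun pj => pvCeil pj.1 pj.2)) m0 1 [] _ h1 (by simp) (by simp)]
    norm_num
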